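-- pv_equiv track=rewrite | github.com/Marciland/advent-of-code | 2023_python/solution/day14.py | push_west
-- ===== SOURCE A (Python) =====
-- def find_free_slot_west(row: str, start_index: int) -> int:
--     '''free_slot is where the next rock could be pushed'''
--     free_slot = start_index
--     for x_index in range(start_index, len(row), 1):
--         if row[x_index] == '.':
--             break
--         free_slot += 1
--     return free_slot
--
-- def push_west(row: str) -> str:
--     '''move all (moveable) rocks "O" as west as possible'''
--     row = list(row)
--     next_slot = find_free_slot_west(row, 0)
--     for x_index, symbol in enumerate(row):
--         if x_index < next_slot:
--             continue
--         if symbol == '.':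
--             continue
--         if symbol == 'O':
--             row[next_slot] = 'O'
--             row[x_index] = '.'
--             next_slot = find_free_slot_west(row, next_slot)
--             continue
--         if symbol == '#':
--             next_slot = find_free_slot_west(row, x_index)
--             continue
--     row = ''.join(row)
--     return row
-- ===== SOURCE B (Python) =====
-- def push_west(row: str) -> str:
--     '''move all (moveable) rocks "O" as west as possible'''
--     out = list(row)
--     slots = []   # indices of currently-free '.' cells in the open segment, in order
--     head = 0     # next slot to fill
--     for i, c in enumerate(row):
--         if c == '#':
--             slots = []
--             head = 0
--         elif c == '.':
--             slots.append(i)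
--         elif c == 'O':
--             if head < len(slots):
--                 j = slots[head]
--                 head += 1
--                 out[j] = 'O'
--                 out[i] = '.'
--                 slots.append(i)
--     return ''.join(out)
-- ===== Notes on version B (the rewrite author's own statement) =====
-- stated objective: alternative
-- what changed: A calls a rescanning helper to find the next free slot after every rock and every wall it processes (quadratic worst case); B makes a single left-to-right pass maintaining a queue of free-slot indices, reset at walls and popped once per moved rock.
import Mathlib
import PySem

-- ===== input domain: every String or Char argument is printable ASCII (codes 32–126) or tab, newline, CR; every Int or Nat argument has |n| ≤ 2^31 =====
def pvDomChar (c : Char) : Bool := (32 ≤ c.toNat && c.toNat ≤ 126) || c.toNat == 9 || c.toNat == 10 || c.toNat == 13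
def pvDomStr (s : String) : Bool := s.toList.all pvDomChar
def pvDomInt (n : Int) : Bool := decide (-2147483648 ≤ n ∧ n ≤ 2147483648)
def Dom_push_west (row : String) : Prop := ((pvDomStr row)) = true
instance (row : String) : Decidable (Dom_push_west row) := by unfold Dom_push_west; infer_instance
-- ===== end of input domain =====

-- B replaces A's repeated next-free-slot rescans (a helper call inside the loop) by a single
-- left-to-right pass keeping a queue of free slot indices (objective: alternative).

-- ===== PORT A =====
-- loop of find_free_slot_west: for x_index in range(start, len(row), 1): break at '.', else free_slot += 1
def ffsGo (row : List Char) : List Int → Int → Int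
  | [], free => free
  | x :: xs, free =>
      if PySem.List.pyGet? row x = some '.' then free else ffsGo row xs (free + 1)

def find_free_slot_west (row : List Char) (start : Int) : Int :=
  ffsGo row (PySem.List.pyRange start (row.length : Int) 1) start

-- one iteration of A's main loop; `i` ranges over 0..len-1 (Python's enumerate over the mutating
-- list: the length never changes and no write ever touches an index the iterator has not passed,
-- so reading the current list at index i is exact). `row.set ns.toNat` is exact: in the branch
-- where it is reached, 0 ≤ ns ≤ i < len, matching Python's row[next_slot] = 'O'.
def pushAStep (st : List Char × Int) (i : Nat) : List Char × Int :=
  let row := st.1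
  let ns := st.2
  let symbol := row.getD i ' '
  if (i : Int) < ns then st
  else if symbol = '.' then st
  else if symbol = 'O' then
    let row1 := row.set ns.toNat 'O'
    let row2 := row1.set i '.'
    (row2, find_free_slot_west row2 ns)
  else if symbol = '#' then (row, find_free_slot_west row (i : Int))
  else st

def push_west (row : String) : String :=
  String.ofList ((List.range row.toList.length).foldl pushAStep
    (row.toList, find_free_slot_west row.toList 0)).1

-- ===== PORT B =====
-- one iteration of B's loop: state (out, slots, head); `out.set i.toNat` / `out.set j.toNat`
-- are exact since enumerate indices and queued slot indices are nonnegative, and slots[head]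
-- (ported as pyGet? with a guarded default) is only read under head < len(slots).
def pushBStep (st : List Char × List Int × Int) (ic : Int × Char) : List Char × List Int × Int :=
  let out := st.1
  let slots := st.2.1
  let head := st.2.2
  let i := ic.1
  let c := ic.2
  if c = '#' then (out, [], 0)
  else if c = '.' then (out, slots ++ [i], head)
  else if c = 'O' then
    if head < (slots.length : Int) then
      let j := (PySem.List.pyGet? slots head).getD 0
      ((out.set j.toNat 'O').set i.toNat '.', slots ++ [i], head + 1)
    else st
  else st

def push_west_alt (row : String) : String :=
  String.ofList ((PySem.List.enumerate row.toList).foldl pushBStep (row.toList, [], 0)).1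

-- ===== PRECONDITION & SPEC =====
def Spec_push_west (row : String) (out : String) : Prop := out = push_west_alt row
instance (row : String) (out : String) : Decidable (Spec_push_west row out) := by unfold Spec_push_west; infer_instance

-- ===== CLAIM (what is proved, stated in full; the proofs are below) =====
def Claim_equal_push_west : Prop := ∀ (row : String), Dom_push_west row → Spec_push_west row (push_west row)

-- ===== LEMMAS AND PROOFS =====

-- index of the first '.' at or after l (l itself if l is past the end)
def firstDot (out : List Char) (l : Nat) : Nat :=
  if h : l < out.length then
    (if out.getD l ' ' = '.' then l else firstDot out (l + 1))
  else l
termination_by out.length - l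

lemma getD_lt_length {out : List Char} {l : Nat} (h : out.getD l ' ' = '.') : l < out.length := by
  by_contra hl
  simp [List.getD_eq_getElem?_getD, List.getElem?_eq_none (by omega : out.length ≤ l)] at h

lemma firstDot_ge (out : List Char) (l : Nat) : l ≤ firstDot out l := by
  fun_induction firstDot out l with
  | case1 l h hd => omega
  | case2 l h hd ih => omega
  | case3 l h => omega

lemma firstDot_min {out : List Char} {l j : Nat} (hlj : l ≤ j) (hj : out.getD j ' ' = '.') :
    firstDot out l ≤ j := by
  fun_induction firstDot out l with
  | case1 l h hd => omega
  | case2 l h hd ih =>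
      rcases Nat.eq_or_lt_of_le hlj with rfl | hlt
      · exact absurd hj hd
      · exact ih (by omega)
  | case3 l h => omega

lemma firstDot_dot {out : List Char} {l : Nat} (h : out.getD l ' ' = '.') : firstDot out l = l := by
  rw [firstDot]
  have hl := getD_lt_length h
  have h' : out[l] = '.' := by
    simpa [List.getD_eq_getElem?_getD, List.getElem?_eq_getElem hl] using h
  simp [hl, h']

lemma firstDot_skip {out : List Char} {l : Nat} (h : out.getD l ' ' ≠ '.') (hl : l < out.length) :
    firstDot out l = firstDot out (l + 1) := by
  have h' : ¬ out[l] = '.' := by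
    simpa [List.getD_eq_getElem?_getD, List.getElem?_eq_getElem hl] using h
  rw [firstDot]; simp [hl, h']

lemma firstDot_shift {out : List Char} {l i : Nat} (hli : l ≤ i) (hin : i ≤ out.length)
    (hno : ∀ j, l ≤ j → j < i → out.getD j ' ' ≠ '.') : firstDot out l = firstDot out i := by
  obtain ⟨d, rfl⟩ : ∃ d, i = l + d := ⟨i - l, by omega⟩
  induction d generalizing l with
  | zero => rfl
  | succ d ih =>
      rw [firstDot_skip (hno l le_rfl (by omega)) (by omega),
        show l + (d + 1) = (l + 1) + d by omega]
      exact ih (by omega) (by omega) (fun j h1 h2 => hno j (by omega) (by omega))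

lemma pyRange_cast (out : List Char) (l : Nat) (h : l ≤ out.length) :
    PySem.List.pyRange (l : Int) (out.length : Int) 1
      = (List.range' l (out.length - l)).map (fun k => Int.ofNat k) := by
  obtain ⟨d, hd⟩ : ∃ d, out.length = l + d := ⟨out.length - l, by omega⟩
  rw [hd, show l + d - l = d by omega]
  clear h hd
  induction d generalizing l with
  | zero => simp [PySem.List.pyRange_one_eq_nil]
  | succ d ih =>
      rw [PySem.List.pyRange_one_cons (by push_cast; omega), List.range'_succ, List.map_cons]
      have := ih (l + 1)
      push_cast at this ⊢
      rw [show (l : Int) + ((d : Int) + 1) = ((l : Int) + 1) + (d : Int) by ring, this]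
      norm_cast

lemma ffsGo_range' (out : List Char) :
    ∀ (m l : Nat), l + m = out.length →
      ffsGo out ((List.range' l m).map (fun k => Int.ofNat k)) (l : Int) = (firstDot out l : Int) := by
  intro m
  induction m with
  | zero =>
      intro l h
      rw [firstDot]
      simp [ffsGo, show ¬ l < out.length by omega]
  | succ m ih =>
      intro l h
      have hl : l < out.length := by omega
      have hgd : out.getD l ' ' = out[l] := by
        simp [List.getD_eq_getElem?_getD, List.getElem?_eq_getElem hl]
      rw [List.range'_succ, List.map_cons, ffsGo, firstDot]
      have hpg : PySem.List.pyGet? out (Int.ofNat l) = some out[l] := by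
        simp [PySem.List.pyGet?_natCast, List.getElem?_eq_getElem hl]
      by_cases hO : out[l] = '.'
      · simp [hO, hl]
      · have := ih (l + 1) (by omega)
        push_cast at this
        rw [hpg, if_neg (by simpa using hO), dif_pos hl, hgd, if_neg hO]
        exact this

lemma ffs_eq (out : List Char) (l : Nat) (h : l ≤ out.length) :
    find_free_slot_west out (l : Int) = (firstDot out l : Int) := by
  unfold find_free_slot_west
  rw [pyRange_cast out l h, ffsGo_range' out (out.length - l) l (by omega)]

lemma getD_set_ne (xs : List Char) (p q : Nat) (c : Char) (h : q ≠ p) :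
    (xs.set p c).getD q ' ' = xs.getD q ' ' := by
  simp [List.getD_eq_getElem?_getD, List.getElem?_set_ne (by omega : p ≠ q)]

lemma getD_set_self (xs : List Char) (p : Nat) (c : Char) (h : p < xs.length) :
    (xs.set p c).getD p ' ' = c := by
  simp [List.getD_eq_getElem?_getD, h]

-- the simulation invariant tying A's state (out, ns) to B's (out, slots, head) before index i,
-- where l is the current segment start (just past the last '#' processed, 0 initially):
-- both hold the same mutated list, ns is the first '.' at or after l, and the not-yet-consumed
-- part of B's queue lists exactly the current '.' positions in [l, i), in increasing order.
def SimInv (orig out : List Char) (i : Nat) (ns : Int) (slots : List Int) (head : Int) (l : Nat) : Prop :=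
  out.length = orig.length ∧ l ≤ i ∧ i ≤ orig.length ∧
  (∀ k, i ≤ k → out.getD k ' ' = orig.getD k ' ') ∧
  ns = (firstDot out l : Int) ∧
  ∃ (h : Nat) (S : List Nat), head = (h : Int) ∧ h ≤ slots.length ∧
    slots.drop h = S.map (fun j => Int.ofNat j) ∧ S.Pairwise (· < ·) ∧
    (∀ j : Nat, j ∈ S ↔ (l ≤ j ∧ j < i ∧ out.getD j ' ' = '.'))

lemma main_sim (orig : List Char) :
    ∀ (m i : Nat) (out : List Char) (ns : Int) (slots : List Int) (head : Int) (l : Nat),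
      i + m = orig.length → SimInv orig out i ns slots head l →
      ((List.range' i m).foldl pushAStep (out, ns)).1
        = (((List.range' i m).map (fun (k : Nat) => ((k : Int), orig.getD k ' '))).foldl pushBStep
            (out, slots, head)).1 := by
  intro m
  induction m with
  | zero => intro i out ns slots head l _ _; rfl
  | succ m ih =>
    intro i out ns slots head l hmn hinv
    obtain ⟨hlen, hli, hin, hsuf, hns, h, S, hhd, hhS, hdrop, hsort, hmem⟩ := hinv
    have hiN : i < orig.length := by omega
    have hiO : i < out.length := by omega
    have hci : out.getD i ' ' = orig.getD i ' ' := hsuf i le_rfl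
    rw [List.range'_succ, List.map_cons, List.foldl_cons, List.foldl_cons]
    by_cases hC1 : orig.getD i ' ' = '#'
    · -- '#': B resets the queue; A either skips (ns past i) or rescans from i — same list either way
      have hB : pushBStep (out, slots, head) ((i : Int), orig.getD i ' ') = (out, [], 0) := by
        simp only [pushBStep]
        rw [if_pos hC1]
      rw [hB]
      by_cases hlt : (i : Int) < ns
      · have hA : pushAStep (out, ns) i = (out, ns) := by
          simp only [pushAStep]; rw [if_pos hlt]
        rw [hA]
        refine ih (i + 1) out ns [] 0 (i + 1) (by omega)
          ⟨hlen, le_rfl, by omega, fun k hk => hsuf k (by omega), ?_,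
            0, [], rfl, by simp, by simp, by simp,
            by intro j; simp only [List.not_mem_nil, false_iff]; rintro ⟨a, b, c⟩; exact absurd b (by omega)⟩
        rw [hns, firstDot_shift (show l ≤ i + 1 by omega) (show i + 1 ≤ out.length by omega)
          (fun j h1 h2 => fun hdot => by
            have := firstDot_min h1 hdot
            omega)]
      · have hA : pushAStep (out, ns) i = (out, find_free_slot_west out (i : Int)) := by
          simp only [pushAStep]
          rw [if_neg hlt, hci, hC1, if_neg (by decide), if_neg (by decide), if_pos rfl]
        rw [hA]
        refine ih (i + 1) out _ [] 0 (i + 1) (by omega)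
          ⟨hlen, le_rfl, by omega, fun k hk => hsuf k (by omega), ?_,
            0, [], rfl, by simp, by simp, by simp,
            by intro j; simp only [List.not_mem_nil, false_iff]; rintro ⟨a, b, c⟩; exact absurd b (by omega)⟩
        rw [ffs_eq out i (by omega),
          firstDot_skip (by rw [hci, hC1]; decide) hiO]
    · by_cases hC2 : orig.getD i ' ' = '.'
      · -- '.': both sides leave the list alone; B records the new free slot
        have hB : pushBStep (out, slots, head) ((i : Int), orig.getD i ' ')
            = (out, slots ++ [(i : Int)], head) := by
          simp only [pushBStep]
          rw [if_neg (by rw [hC2]; decide), if_pos hC2]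
        have hA : pushAStep (out, ns) i = (out, ns) := by
          by_cases hlt : (i : Int) < ns
          · simp only [pushAStep]; rw [if_pos hlt]
          · simp only [pushAStep]; rw [if_neg hlt, hci, hC2, if_pos rfl]
        rw [hA, hB]
        refine ih (i + 1) out ns (slots ++ [(i : Int)]) head l (by omega)
          ⟨hlen, by omega, by omega, fun k hk => hsuf k (by omega), hns,
            h, S ++ [i], hhd, by simpa using hhS.trans (Nat.le_succ _), ?_, ?_, ?_⟩
        · rw [List.drop_append_of_le_length hhS, hdrop, List.map_append]
          simp
        · refine List.pairwise_append.mpr ⟨hsort, by simp, ?_⟩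
          intro a ha b hb
          simp at hb
          subst hb
          exact ((hmem a).mp ha).2.1
        · intro j
          rw [List.mem_append, hmem j]
          have hdi : out.getD i ' ' = '.' := by rw [hci, hC2]
          constructor
          · rintro (⟨h1, h2, h3⟩ | hj)
            · exact ⟨h1, by omega, h3⟩
            · simp at hj; subst hj; exact ⟨hli, by omega, hdi⟩
          · rintro ⟨h1, h2, h3⟩
            by_cases hji : j = i
            · right; simp [hji]
            · left; exact ⟨h1, by omega, h3⟩
      · by_cases hC3 : orig.getD i ' ' = 'O'
        · -- 'O': either no free slot (both skip) or the rock moves to the first free slot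
          rcases hS : S with _ | ⟨k, rest⟩
          · -- no free slot: S = [], A's ns is beyond i
            have hempty : slots.length ≤ h := by
              have := congrArg List.length hdrop
              simp [hS] at this
              omega
            have hB : pushBStep (out, slots, head) ((i : Int), orig.getD i ' ')
                = (out, slots, head) := by
              simp only [pushBStep]
              rw [if_neg hC1, if_neg hC2, if_pos hC3, if_neg (by rw [hhd]; omega)]
            have hnogap : ∀ j, l ≤ j → j < i → out.getD j ' ' ≠ '.' := by
              intro j h1 h2 hdot
              have := (hmem j).mpr ⟨h1, h2, hdot⟩
              simp [hS] at this
            have hnsv : ns = (firstDot out (i + 1) : Int) := by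
              rw [hns, firstDot_shift hli (by omega) hnogap,
                firstDot_skip (by rw [hci, hC3]; decide) hiO]
            have hlt : (i : Int) < ns := by
              rw [hnsv]
              have := firstDot_ge out (i + 1)
              omega
            have hA : pushAStep (out, ns) i = (out, ns) := by
              simp only [pushAStep]; rw [if_pos hlt]
            rw [hA, hB]
            refine ih (i + 1) out ns slots head l (by omega)
              ⟨hlen, by omega, by omega, fun k hk => hsuf k (by omega), hns,
                h, [], hhd, hhS, by rw [hdrop, hS], by simp, ?_⟩
            intro j
            simp only [List.not_mem_nil, false_iff]
            rintro ⟨h1, h2, h3⟩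
            by_cases hji : j = i
            · subst hji; rw [hci, hC3] at h3; exact absurd h3 (by decide)
            · exact hnogap j h1 (by omega) h3
          · -- the rock at i moves to slot k = slots[head]
            have hkS := (hmem k).mp (by rw [hS]; exact List.mem_cons_self)
            obtain ⟨hlk, hki, hkdot⟩ := hkS
            have hkO : k < out.length := getD_lt_length hkdot
            have hnogap : ∀ j, l ≤ j → j < k → out.getD j ' ' ≠ '.' := by
              intro j h1 h2 hdot
              have hjS := (hmem j).mpr ⟨h1, by omega, hdot⟩
              rw [hS] at hjS
              rcases List.mem_cons.mp hjS with rfl | hjr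
              · omega
              · have := (List.pairwise_cons.mp (hS ▸ hsort)).1 j hjr
                omega
            have hnsk : ns = (k : Int) := by
              rw [hns, firstDot_shift hlk (by omega) hnogap, firstDot_dot hkdot]
            have hlenS : h < slots.length := by
              have := congrArg List.length hdrop
              simp [hS] at this
              omega
            have hgetk : slots[h]? = some ((k : Int)) := by
              have h0 : (slots.drop h)[0]? = slots[h]? := by
                rw [List.getElem?_drop]; norm_num
              rw [← h0, hdrop, hS]
              rfl
            have hB : pushBStep (out, slots, head) ((i : Int), orig.getD i ' ')
                = ((out.set k 'O').set i '.', slots ++ [(i : Int)], head + 1) := by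
              simp only [pushBStep, hhd]
              rw [if_neg hC1, if_neg hC2, if_pos hC3, if_pos (by exact_mod_cast hlenS)]
              simp [PySem.List.pyGet?_natCast, hgetk]
            have hnlt : ¬ (i : Int) < ns := by rw [hnsk]; exact_mod_cast Nat.not_lt.mpr (le_of_lt hki)
            have hA : pushAStep (out, ns) i
                = ((out.set k 'O').set i '.',
                   find_free_slot_west ((out.set k 'O').set i '.') ns) := by
              simp only [pushAStep]
              rw [if_neg hnlt, hci, if_neg (by rw [hC3]; decide), if_pos hC3, hnsk]
              simp
            rw [hA, hB]
            set out' := (out.set k 'O').set i '.' with hout'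
            have hlen' : out'.length = out.length := by simp [hout']
            have hget' : ∀ j, j ≠ i → j ≠ k → out'.getD j ' ' = out.getD j ' ' := by
              intro j hji hjk
              rw [hout', getD_set_ne _ _ _ _ hji, getD_set_ne _ _ _ _ hjk]
            have hgi : out'.getD i ' ' = '.' := getD_set_self _ _ _ (by simp; omega)
            have hgk : out'.getD k ' ' = 'O' := by
              rw [hout', getD_set_ne _ _ _ _ (by omega), getD_set_self _ _ _ hkO]
            have hrest : ∀ j, j ∈ rest → (l ≤ j ∧ j < i ∧ out.getD j ' ' = '.' ∧ k < j) := by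
              intro j hj
              have h1 := (hmem j).mp (by rw [hS]; exact List.mem_cons_of_mem _ hj)
              have h2 := (List.pairwise_cons.mp (hS ▸ hsort)).1 j hj
              exact ⟨h1.1, h1.2.1, h1.2.2, h2⟩
            refine ih (i + 1) out' _ (slots ++ [(i : Int)]) (head + 1) l (by omega)
              ⟨by omega, by omega, by omega, ?_, ?_, h + 1, rest ++ [i],
                by rw [hhd]; push_cast; ring, by simpa using Nat.succ_le_succ (le_of_lt hlenS), ?_, ?_, ?_⟩
            · intro j hj
              rw [hget' j (by omega) (by omega)]
              exact hsuf j (by omega)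
            · rw [hnsk, ffs_eq out' k (by omega),
                firstDot_shift hlk (by omega)
                  (fun j h1 h2 hdot => hnogap j h1 h2 (by rwa [hget' j (by omega) (by omega)] at hdot))]
            · have hd1 : slots.drop (h + 1) = rest.map (fun j => Int.ofNat j) := by
                rw [← List.drop_drop, hdrop, hS]; simp
              rw [List.drop_append_of_le_length (by omega), hd1, List.map_append]
              simp
            · refine List.pairwise_append.mpr ⟨(List.pairwise_cons.mp (hS ▸ hsort)).2, by simp, ?_⟩
              intro a ha b hb
              simp at hb
              subst hb
              exact (hrest a ha).2.1
            · intro j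
              rw [List.mem_append]
              constructor
              · rintro (hj | hj)
                · obtain ⟨h1, h2, h3, h4⟩ := hrest j hj
                  exact ⟨h1, by omega, by rw [hget' j (by omega) (by omega)]; exact h3⟩
                · simp at hj; subst hj
                  exact ⟨by omega, by omega, hgi⟩
              · rintro ⟨h1, h2, h3⟩
                by_cases hji : j = i
                · right; simp [hji]
                · left
                  have hjk : j ≠ k := by
                    intro hjk; subst hjk
                    rw [hgk] at h3; exact absurd h3 (by decide)
                  rw [hget' j hji hjk] at h3
                  have hjS := (hmem j).mpr ⟨h1, by omega, h3⟩
                  rw [hS] at hjS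
                  exact (List.mem_cons.mp hjS).resolve_left hjk
        · -- any other character: both sides do nothing
          have hB : pushBStep (out, slots, head) ((i : Int), orig.getD i ' ')
              = (out, slots, head) := by
            simp only [pushBStep]
            rw [if_neg hC1, if_neg hC2, if_neg hC3]
          have hA : pushAStep (out, ns) i = (out, ns) := by
            by_cases hlt : (i : Int) < ns
            · simp only [pushAStep]; rw [if_pos hlt]
            · simp only [pushAStep]
              rw [if_neg hlt, hci, if_neg hC2, if_neg hC3, if_neg hC1]
          rw [hA, hB]
          refine ih (i + 1) out ns slots head l (by omega)
            ⟨hlen, by omega, by omega, fun k hk => hsuf k (by omega), hns,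
              h, S, hhd, hhS, hdrop, hsort, ?_⟩
          intro j
          rw [hmem j]
          constructor
          · rintro ⟨h1, h2, h3⟩; exact ⟨h1, by omega, h3⟩
          · rintro ⟨h1, h2, h3⟩
            refine ⟨h1, ?_, h3⟩
            by_cases hji : j = i
            · subst hji; rw [hci] at h3; exact absurd h3 hC2
            · omega

lemma enum_eq (r : List Char) :
    PySem.List.enumerate r
      = (List.range' 0 r.length).map (fun (k : Nat) => ((k : Int), r.getD k ' ')) := by
  rw [PySem.List.enumerate_eq_map_pyRange r ' ']
  rw [show ((PySem.List.len r : Int)) = ((r.length : Nat) : Int) by simp [PySem.List.len],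
    show (0 : Int) = ((0 : Nat) : Int) by simp, pyRange_cast r 0 (Nat.zero_le _), List.map_map]
  refine List.map_congr_left (fun k hk => ?_)
  simp [PySem.List.pyGetD_natCast]

-- ===== VERDICT (by name: the statement is the Claim_ definition above) =====
theorem push_west_spec : Claim_equal_push_west := by
  intro row _
  unfold Spec_push_west push_west push_west_alt
  rw [enum_eq row.toList, List.range_eq_range']
  congr 1
  refine main_sim row.toList row.toList.length 0 row.toList _ [] 0 0 (by omega) ?_
  refine ⟨rfl, le_rfl, Nat.zero_le _, fun k _ => rfl, ?_,
    0, [], rfl, by simp, by simp, by simp, by simp⟩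
  exact ffs_eq row.toList 0 (Nat.zero_le _)
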